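-- pv_equiv track=rewrite | github.com/GA1/python-algs | src/algs/fib_frog.py | steps_lower_or_equal_than
-- ===== SOURCE A (Python) =====
-- def fibonacci(n):
--     if n == 0:
--         return 0
--     elif n == 1:
--         return 1
--     return fibonacci(n - 2) + fibonacci(n - 1)
--
-- def steps_lower_or_equal_than(n):
--     steps = []
--     i = 2
--     while True:
--         if i < 4:
--             curr_fib = fibonacci(i)
--         else:
--             curr_fib = steps[i - 4] + steps[i - 3]
--         if curr_fib <= n:
--             steps.append(curr_fib)
--         else:
--             break
--         i = i + 1
--     return steps
-- ===== SOURCE B (Python) =====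
-- def fib(k):
--     # fast doubling: returns the k-th Fibonacci number (fib 0 = 0, fib 1 = 1)
--     def fd(k):
--         if k == 0:
--             return (0, 1)
--         a, b = fd(k // 2)
--         c = a * (2 * b - a)
--         d = a * a + b * b
--         if k % 2 == 1:
--             return (d, c + d)
--         return (c, d)
--     return fd(k)[0]
--
-- def steps_lower_or_equal_than(n):
--     i = 2
--     while fib(i) <= n:
--         i = i + 1
--     return [fib(k) for k in range(2, i)]
-- ===== Notes on version B (the rewrite author's own statement) =====
-- stated objective: alternative
-- what changed: Instead of extending the list via the additive recurrence (A reads steps[i-4]+steps[i-3] from the list being built), B computes each Fibonacci number independently by the fast-doubling identities, first searching for the cutoff index and then building the list with a comprehension over range(2, i).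
import Mathlib
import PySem

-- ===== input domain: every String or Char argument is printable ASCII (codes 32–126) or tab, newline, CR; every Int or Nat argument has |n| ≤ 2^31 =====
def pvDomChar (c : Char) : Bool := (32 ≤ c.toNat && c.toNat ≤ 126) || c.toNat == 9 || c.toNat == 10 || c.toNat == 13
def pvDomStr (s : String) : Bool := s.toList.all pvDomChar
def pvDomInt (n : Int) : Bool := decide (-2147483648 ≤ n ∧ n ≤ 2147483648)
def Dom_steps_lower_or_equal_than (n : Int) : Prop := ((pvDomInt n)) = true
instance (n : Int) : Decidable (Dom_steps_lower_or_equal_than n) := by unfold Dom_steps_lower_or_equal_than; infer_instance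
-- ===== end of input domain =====

-- B replaces A's additive chain through the list being built by independent fast-doubling
-- Fibonacci evaluations: a cutoff-index search followed by a comprehension over range(2, i);
-- objective: alternative. Both ports carry a fuel counter (n.toNat + 2) solely as a totality
-- guard: it strictly exceeds the iteration count on every input, since the tested Fibonacci
-- values are strictly increasing positive integers bounded by n.

-- ===== PORT A =====
-- literal port of A's recursive fibonacci helper (only ever called with 2 and 3;
-- the .toNat is a totality guard for negative arguments Python A never reaches)
def fibHelperNat : Nat → Int
  | 0 => 0
  | 1 => 1
  | (k + 2) => fibHelperNat k + fibHelperNat (k + 1)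

def fibHelper (n : Int) : Int := fibHelperNat n.toNat

-- A's `while True` loop: steps list and index i; steps[i-4] / steps[i-3] always in range
-- when reached, so pyGetD with default 0 is exact there.
def stepsLoopA (n : Int) : Nat → List Int → Int → List Int
  | 0, steps, _ => steps
  | fuel + 1, steps, i =>
    let curr : Int :=
      if i < 4 then fibHelper i
      else PySem.List.pyGetD steps (i - 4) 0 + PySem.List.pyGetD steps (i - 3) 0
    if curr ≤ n then stepsLoopA n fuel (steps ++ [curr]) (i + 1) else steps

def steps_lower_or_equal_than (n : Int) : List Int :=
  stepsLoopA n (n.toNat + 2) [] 2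

-- ===== PORT B =====
-- B's fast-doubling helper fd(k) = (fib k, fib (k+1)); recursion on k // 2
def fd : Nat → Int × Int
  | 0 => (0, 1)
  | k + 1 =>
    let p := fd ((k + 1) / 2)
    let a := p.1
    let b := p.2
    let c := a * (2 * b - a)
    let d := a * a + b * b
    if (k + 1) % 2 = 1 then (d, c + d) else (c, d)
decreasing_by omega

-- B's fib(k) = fd(k)[0]; Python only ever calls it with k ≥ 2, so a Nat argument is exact
def fibB (k : Nat) : Int := (fd k).1

-- B's `while fib(i) <= n: i = i + 1` cutoff search (i starts at 2 and only grows, so i.toNat is exact)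
def cutoffB (n : Int) : Nat → Int → Int
  | 0, i => i
  | fuel + 1, i => if fibB i.toNat ≤ n then cutoffB n fuel (i + 1) else i

-- B's `[fib(k) for k in range(2, i)]`
def steps_lower_or_equal_than_alt (n : Int) : List Int :=
  (PySem.List.pyRange 2 (cutoffB n (n.toNat + 2) 2) 1).map (fun k => fibB k.toNat)

-- ===== PRECONDITION & SPEC =====
def Spec_steps_lower_or_equal_than (n : Int) (out : List Int) : Prop := out = steps_lower_or_equal_than_alt n
instance (n : Int) (out : List Int) : Decidable (Spec_steps_lower_or_equal_than n out) := by unfold Spec_steps_lower_or_equal_than; infer_instance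

-- ===== CLAIM (what is proved, stated in full; the proofs are below) =====
def Claim_equal_steps_lower_or_equal_than : Prop := ∀ (n : Int), Dom_steps_lower_or_equal_than n → Spec_steps_lower_or_equal_than n (steps_lower_or_equal_than n)

-- ===== LEMMAS AND PROOFS =====

-- fast doubling is correct: fd k = (fib k, fib (k+1))
lemma fd_correct : ∀ k : Nat, fd k = ((Nat.fib k : Int), (Nat.fib (k + 1) : Int)) := by
  intro k
  induction k using Nat.strong_induction_on with
  | _ k ih =>
    match k with
    | 0 => simp [fd]
    | k + 1 =>
      have hm : (k + 1) / 2 < k + 1 := by omega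
      rw [fd, ih _ hm]
      set m := (k + 1) / 2 with hmdef
      have hle : Nat.fib m ≤ 2 * Nat.fib (m + 1) := by
        have := Nat.fib_le_fib_succ (n := m); omega
      by_cases hp : (k + 1) % 2 = 1
      · have hk : k + 1 = 2 * m + 1 := by omega
        rw [if_pos hp, hk]
        have h1 : Nat.fib (2 * m + 1) = Nat.fib (m + 1) ^ 2 + Nat.fib m ^ 2 :=
          Nat.fib_two_mul_add_one m
        have h2 : Nat.fib (2 * m + 1 + 1) = Nat.fib (2 * m) + Nat.fib (2 * m + 1) := by
          have := Nat.fib_add_two (n := 2 * m); omega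
        have h3 : Nat.fib (2 * m) = Nat.fib m * (2 * Nat.fib (m + 1) - Nat.fib m) :=
          Nat.fib_two_mul m
        simp only [Prod.mk.injEq]
        constructor
        · rw [h1]; push_cast; ring
        · rw [h2, h3, h1]
          push_cast [Nat.cast_sub hle]
          ring
      · have hk : k + 1 = 2 * m := by omega
        rw [if_neg hp, hk]
        have h1 : Nat.fib (2 * m) = Nat.fib m * (2 * Nat.fib (m + 1) - Nat.fib m) :=
          Nat.fib_two_mul m
        have h2 : Nat.fib (2 * m + 1) = Nat.fib (m + 1) ^ 2 + Nat.fib m ^ 2 :=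
          Nat.fib_two_mul_add_one m
        simp only [Prod.mk.injEq]
        constructor
        · rw [h1]; push_cast [Nat.cast_sub hle]; ring
        · rw [h2]; push_cast; ring

lemma fibB_eq (k : Nat) : fibB k = (Nat.fib k : Int) := by
  simp [fibB, fd_correct k]

-- the Fibonacci recurrence for fibB
lemma fibB_rec (k : Nat) : fibB (k + 4) = fibB (k + 2) + fibB (k + 3) := by
  simp only [fibB_eq]
  have h := Nat.fib_add_two (n := k + 2)
  rw [show k + 2 + 2 = k + 4 from by omega, show k + 2 + 1 = k + 3 from by omega] at h
  omega

-- canonical truncated list [fibB j, fibB (j+1), …] while ≤ n, capped by fuel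
def canon (n : Int) : Nat → Nat → List Int
  | 0, _ => []
  | fuel + 1, j => if fibB j ≤ n then fibB j :: canon n fuel (j + 1) else []

-- the list A has built after m+2 appended elements
def fibsPre (m : Nat) : List Int := (List.range (m + 2)).map (fun k => fibB (k + 2))

lemma fibsPre_getD_fst (m : Nat) : PySem.List.pyGetD (fibsPre m) ((m : Int) + 4 - 4) 0 = fibB (m + 2) := by
  have h : ((m : Int) + 4 - 4) = ((m : Nat) : Int) := by ring
  rw [h, PySem.List.pyGetD_natCast]
  simp [fibsPre, List.getD]

lemma fibsPre_getD_snd (m : Nat) : PySem.List.pyGetD (fibsPre m) ((m : Int) + 4 - 3) 0 = fibB (m + 3) := by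
  have h : ((m : Int) + 4 - 3) = ((m + 1 : Nat) : Int) := by push_cast; ring
  rw [h, PySem.List.pyGetD_natCast]
  simp [fibsPre, List.getD]

lemma fibsPre_succ (m : Nat) : fibsPre m ++ [fibB (m + 4)] = fibsPre (m + 1) := by
  simp [fibsPre, List.range_succ]

-- A's loop, once two values are in the list, produces the canonical tail
lemma loopA_canon (n : Int) (fuel : Nat) :
    ∀ m : Nat, stepsLoopA n fuel (fibsPre m) ((m : Int) + 4) = fibsPre m ++ canon n fuel (m + 4) := by
  induction fuel with
  | zero => intro m; simp [stepsLoopA, canon]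
  | succ f ih =>
    intro m
    rw [stepsLoopA, canon]
    have hi : ¬ ((m : Int) + 4 < 4) := by omega
    rw [if_neg hi, fibsPre_getD_fst, fibsPre_getD_snd, ← fibB_rec]
    by_cases h : fibB (m + 4) ≤ n
    · rw [if_pos h, if_pos h, fibsPre_succ]
      have hcast : (m : Int) + 4 + 1 = ((m + 1 : Nat) : Int) + 4 := by push_cast; ring
      rw [hcast, ih (m + 1)]
      have : m + 1 + 4 = m + 4 + 1 := by omega
      rw [this, ← fibsPre_succ]
      simp
    · rw [if_neg h, if_neg h]
      simp

-- the cutoff index never moves left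
lemma cutoffB_ge (n : Int) : ∀ (fuel : Nat) (i : Int), i ≤ cutoffB n fuel i := by
  intro fuel
  induction fuel with
  | zero => intro i; simp [cutoffB]
  | succ f ih =>
    intro i
    rw [cutoffB]
    by_cases h : fibB i.toNat ≤ n
    · rw [if_pos h]; have := ih (i + 1); omega
    · rw [if_neg h]

-- B's two passes (cutoff search, then comprehension) produce the canonical list
lemma loopB_canon (n : Int) : ∀ (fuel : Nat) (j : Nat),
    (PySem.List.pyRange (j : Int) (cutoffB n fuel (j : Int)) 1).map (fun k => fibB k.toNat) =
      canon n fuel j := by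
  intro fuel
  induction fuel with
  | zero => intro j; simp [cutoffB, canon, PySem.List.pyRange_one_eq_nil]
  | succ f ih =>
    intro j
    rw [cutoffB, canon]
    have ht : ((j : Int)).toNat = j := by omega
    rw [ht]
    by_cases h : fibB j ≤ n
    · rw [if_pos h, if_pos h]
      have hge : (j : Int) + 1 ≤ cutoffB n f ((j : Int) + 1) := cutoffB_ge n f _
      have hlt : (j : Int) < cutoffB n f ((j : Int) + 1) := by omega
      rw [PySem.List.pyRange_one_cons hlt, List.map_cons, ht]
      have hcast : ((j : Int) + 1) = ((j + 1 : Nat) : Int) := by push_cast; ring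
      rw [hcast, ih (j + 1)]
    · rw [if_neg h, if_neg h]
      rw [PySem.List.pyRange_one_eq_nil (by omega)]
      simp

-- ===== VERDICT (by name: the statement is the Claim_ definition above) =====
theorem steps_lower_or_equal_than_spec : Claim_equal_steps_lower_or_equal_than := by
  intro n _
  unfold Spec_steps_lower_or_equal_than steps_lower_or_equal_than steps_lower_or_equal_than_alt
  have hB := loopB_canon n (n.toNat + 2) 2
  simp only [Nat.cast_ofNat] at hB
  rw [hB]
  -- peel the first two iterations of A and the first two steps of canon
  rw [stepsLoopA, canon]
  have h2 : (2 : Int) < 4 := by norm_num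
  rw [if_pos h2]
  have hfibA2 : fibHelper 2 = 1 := by decide
  have hfibB2 : fibB 2 = 1 := by rw [fibB_eq]; norm_num
  rw [hfibA2, hfibB2]
  by_cases h1 : (1 : Int) ≤ n
  · rw [if_pos h1, if_pos h1]
    rw [stepsLoopA, canon]
    have h3 : (2 : Int) + 1 < 4 := by norm_num
    rw [if_pos h3]
    have hfibA3 : fibHelper (2 + 1) = 2 := by decide
    have hfibB3 : fibB (2 + 1) = 2 := by rw [fibB_eq]; norm_num
    have hfibB3' : fibB 3 = 2 := by rw [fibB_eq]; norm_num
    rw [hfibA3, hfibB3]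
    by_cases hb : (2 : Int) ≤ n
    · rw [if_pos hb, if_pos hb]
      have hpre : ([] : List Int) ++ [(1 : Int)] ++ [(2 : Int)] = fibsPre 0 := by
        simp [fibsPre, List.range_succ, hfibB2, hfibB3']
      have hi : ((2 : Int) + 1 + 1) = ((0 : Nat) : Int) + 4 := by norm_num
      rw [hpre, hi, loopA_canon n n.toNat 0]
      simp [fibsPre, List.range_succ, hfibB2, hfibB3']
    · rw [if_neg hb, if_neg hb]; simp
  · rw [if_neg h1, if_neg h1]
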